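-- pv_equiv track=rewrite | github.com/mwcyu/3896-algorithm-labs- | Week 0/practice.py | ourSharedValues
-- ===== SOURCE A (Python) =====
-- def counter(a):
--     a = list(a)
--     output = dict()
--     for each in a:
--         if each not in output:
--             output[each] =  a.count(each)
--     return output
--
-- def  ourSharedValues(a, b):
--     a = counter(a)
--     b = counter(b)
--     output = dict()
--
--     for each in a:
--         if each in b:
--             if a[each]> b[each]:
--                 output[each] = b[each]
--             else:
--                 output[each] = a[each]
--     return output
-- ===== SOURCE B (Python) =====
-- def ourSharedValues(a, b):
--     ca = {}
--     for x in a: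
--         ca[x] = ca.get(x, 0) + 1
--     cb = {}
--     for x in b:
--         cb[x] = cb.get(x, 0) + 1
--     return {k: min(v, cb[k]) for k, v in ca.items() if k in cb}
-- ===== Notes on version B (the rewrite author's own statement) =====
-- stated objective: faster
-- what changed: Replaces the quadratic counting helper (which calls list.count inside a loop over the list) by single-pass increment counting of each list, and the compare-and-branch intersection loop by one dict comprehension taking min of the two counts.
import Mathlib
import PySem

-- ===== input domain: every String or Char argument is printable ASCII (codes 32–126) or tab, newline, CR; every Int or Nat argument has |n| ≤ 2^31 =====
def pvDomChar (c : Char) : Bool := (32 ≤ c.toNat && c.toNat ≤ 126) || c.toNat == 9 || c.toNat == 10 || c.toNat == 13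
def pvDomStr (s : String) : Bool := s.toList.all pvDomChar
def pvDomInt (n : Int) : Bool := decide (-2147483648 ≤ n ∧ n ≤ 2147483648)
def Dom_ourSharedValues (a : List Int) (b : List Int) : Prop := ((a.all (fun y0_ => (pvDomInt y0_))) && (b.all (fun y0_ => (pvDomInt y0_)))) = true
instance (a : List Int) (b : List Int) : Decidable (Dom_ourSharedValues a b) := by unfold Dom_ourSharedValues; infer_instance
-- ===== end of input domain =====

-- B replaces A's quadratic list.count-in-a-loop counting by single-pass increment
-- counting and a min-based comprehension (objective: faster, measured).

-- ===== PORT A =====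
-- Python helper 'counter': for each in a: if each not in output: output[each] = a.count(each)
def counterA (l : List Int) : PySem.Dict Int Int :=
  l.foldl (fun d x => if d.contains x then d else d.insert x ((l.count x : Int))) PySem.Dict.empty

def ourSharedValues (a : List Int) (b : List Int) : List (Int × Int) :=
  let da := counterA a
  let db := counterA b
  -- for each in da: if each in db: output[each] = b[each] / a[each]
  -- (d[k] is ported as getD k 0: every key looked up is present, so this is exact)
  (da.keys.foldl (fun out k =>
      if db.contains k then
        if da.getD k 0 > db.getD k 0 then out.insert k (db.getD k 0)
        else out.insert k (da.getD k 0)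
      else out) PySem.Dict.empty).items

-- ===== PORT B =====
def ourSharedValues_alt (a : List Int) (b : List Int) : List (Int × Int) :=
  let ca := a.foldl (fun d x => d.insert x (d.getD x 0 + 1)) PySem.Dict.empty
  let cb := b.foldl (fun d x => d.insert x (d.getD x 0 + 1)) PySem.Dict.empty
  -- {k: min(v, cb[k]) for k, v in ca.items() if k in cb}  (cb[k] ported as getD: k is present)
  (ca.items.foldl (fun out kv =>
      if cb.contains kv.1 then out.insert kv.1 (min kv.2 (cb.getD kv.1 0)) else out)
    PySem.Dict.empty).items

-- ===== PRECONDITION & SPEC =====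
def Spec_ourSharedValues (a : List Int) (b : List Int) (out : List (Int × Int)) : Prop := out = ourSharedValues_alt a b
instance (a : List Int) (b : List Int) (out : List (Int × Int)) : Decidable (Spec_ourSharedValues a b out) := by unfold Spec_ourSharedValues; infer_instance

-- ===== CLAIM (what is proved, stated in full; the proofs are below) =====
def Claim_equal_ourSharedValues : Prop := ∀ (a : List Int) (b : List Int), Dom_ourSharedValues a b → Spec_ourSharedValues a b (ourSharedValues a b)

-- ===== LEMMAS AND PROOFS =====

theorem dict_ext {κ ν : Type} (d e : PySem.Dict κ ν) (h : d.items = e.items) : d = e := by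
  cases d; cases e; simpa using h

-- the keys of l that are new w.r.t. 'seen', in first-occurrence order
def newOnes : List Int → List Int → List Int
  | [], _ => []
  | x :: xs, seen => if x ∈ seen then newOnes xs seen else x :: newOnes xs (seen ++ [x])

theorem update_eq_append_newOnes (l : List Int) : ∀ (seen : PySem.Set Int),
    PySem.Set.update seen l = seen ++ newOnes l seen := by
  induction l with
  | nil => intro seen; simp [newOnes, PySem.Set.update]
  | cons x xs ih =>
    intro seen
    by_cases hx : x ∈ seen
    · have h1 : PySem.Set.update seen (x :: xs) = PySem.Set.update seen xs := by
        simp [PySem.Set.update, PySem.Set.add_of_mem hx]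
      rw [h1, ih seen]
      simp [newOnes, hx]
    · have h1 : PySem.Set.update seen (x :: xs) = PySem.Set.update (seen ++ [x]) xs := by
        simp [PySem.Set.update, PySem.Set.add_of_not_mem hx]
      rw [h1, ih (seen ++ [x])]
      simp [newOnes, hx]

theorem newOnes_nil_eq_ofList (l : List Int) : newOnes l [] = PySem.Set.ofList l := by
  have := update_eq_append_newOnes l []
  simpa [PySem.Set.ofList_eq_foldl, PySem.Set.update] using this.symm

theorem counterA_fold_items (v : Int → Int) : ∀ (l : List Int) (d : PySem.Dict Int Int),
    (l.foldl (fun d x => if d.contains x then d else d.insert x (v x)) d).items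
      = d.items ++ (newOnes l d.keys).map (fun k => (k, v k)) := by
  intro l
  induction l with
  | nil => intro d; simp [newOnes]
  | cons x xs ih =>
    intro d
    by_cases hx : x ∈ d.keys
    · have hc : d.contains x = true := (PySem.Dict.contains_iff_mem_keys d x).2 hx
      simp only [List.foldl_cons, hc, if_true]
      rw [ih d]
      simp [newOnes, hx]
    · have hc : d.contains x = false := by
        by_contra h
        exact hx ((PySem.Dict.contains_iff_mem_keys d x).1 (by simpa using h))
      simp only [List.foldl_cons, hc, Bool.false_eq_true, if_false]
      rw [ih (d.insert x (v x)), PySem.Dict.items_insert_of_not_contains d _ hc,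
        PySem.Dict.keys_insert_of_not_contains d _ hc]
      simp [newOnes, hx]

theorem counterA_eq_counter (l : List Int) : counterA l = PySem.Dict.counter l := by
  apply dict_ext
  rw [PySem.Dict.items_counter]
  have := counterA_fold_items (fun x => (l.count x : Int)) l PySem.Dict.empty
  simpa [counterA, newOnes_nil_eq_ofList] using this

-- folding fresh distinct keys: the built dict's items are the filtered, mapped keys
theorem foldl_insert_fresh (p : Int → Bool) (f : Int → Int) :
    ∀ (ks : List Int) (d : PySem.Dict Int Int), ks.Nodup →
      (∀ k ∈ ks, d.contains k = false) →
      (ks.foldl (fun out k => if p k then out.insert k (f k) else out) d).items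
        = d.items ++ (ks.filter p).map (fun k => (k, f k)) := by
  intro ks
  induction ks with
  | nil => intro d _ _; simp
  | cons k ks ih =>
    intro d hnd hfresh
    have hk : d.contains k = false := hfresh k (by simp)
    by_cases hp : p k
    · rw [List.foldl_cons, if_pos hp, ih _ (List.nodup_cons.1 hnd).2 ?fresh,
        PySem.Dict.items_insert_of_not_contains d _ hk]
      · simp [hp]
      case fresh =>
        intro k' hk'
        rw [PySem.Dict.contains_insert]
        have hne : k' ≠ k := by rintro rfl; exact (List.nodup_cons.1 hnd).1 hk'
        simp [hne, hfresh k' (by simp [hk'])]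
    · rw [List.foldl_cons, if_neg hp,
        ih _ (List.nodup_cons.1 hnd).2 (fun k' h => hfresh k' (by simp [h]))]
      simp [hp]

-- ===== VERDICT (by name: the statement is the Claim_ definition above) =====
theorem ourSharedValues_spec : Claim_equal_ourSharedValues := by
  intro a b _
  unfold Spec_ourSharedValues ourSharedValues ourSharedValues_alt
  dsimp only
  rw [counterA_eq_counter a, counterA_eq_counter b,
    PySem.Dict.foldl_insert_getD_add_one_eq_counter a,
    PySem.Dict.foldl_insert_getD_add_one_eq_counter b,
    PySem.Dict.items_counter a, List.foldl_map, PySem.Dict.keys_counter]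
  dsimp only
  have eA : ∀ (out : PySem.Dict Int Int) (k : Int),
      (if (PySem.Dict.counter b).contains k = true then
        if (PySem.Dict.counter a).getD k 0 > (PySem.Dict.counter b).getD k 0 then
          out.insert k ((PySem.Dict.counter b).getD k 0)
        else out.insert k ((PySem.Dict.counter a).getD k 0)
      else out)
      = if (PySem.Dict.counter b).contains k = true then
          out.insert k (if (PySem.Dict.counter a).getD k 0 > (PySem.Dict.counter b).getD k 0 then
            (PySem.Dict.counter b).getD k 0 else (PySem.Dict.counter a).getD k 0)
        else out := by
    intro out k; split_ifs <;> rfl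
  simp only [eA]
  rw [foldl_insert_fresh (fun k => (PySem.Dict.counter b).contains k)
        (fun k => if (PySem.Dict.counter a).getD k 0 > (PySem.Dict.counter b).getD k 0
                  then (PySem.Dict.counter b).getD k 0 else (PySem.Dict.counter a).getD k 0)
        (PySem.Set.ofList a) PySem.Dict.empty (PySem.Set.nodup_ofList a)
        (fun k _ => PySem.Dict.contains_empty k),
      foldl_insert_fresh (fun k => (PySem.Dict.counter b).contains k)
        (fun k => min ((List.count k a : Int)) ((PySem.Dict.counter b).getD k 0))
        (PySem.Set.ofList a) PySem.Dict.empty (PySem.Set.nodup_ofList a)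
        (fun k _ => PySem.Dict.contains_empty k)]
  congr 1
  apply List.map_congr_left
  intro k _
  simp only [PySem.Dict.getD_counter]
  congr 1
  omega
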